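-- pv_equiv track=rewrite | github.com/MattesR/infinigram_explorer | tightest_queries.py | generate_key_combinations
-- ===== SOURCE A (Python) =====
-- import itertools
--
-- def generate_key_combinations(grouped_keys):
--     """
--     Generate all combinations picking one keyword per aspect group.
--     Also includes combinations where some aspects are omitted.
--     Each combo is a list of pieces.
--     """
--     groups = list(grouped_keys.values())
--     # Each group: pick one OR pick none
--     choices_per_group = [group + [None] for group in groups]
--     all_combos = []
--     for combo in itertools.product(*choices_per_group):
--         selected = [c for c in combo if c is not None]
--         if selected:
--             all_combos.append(selected)
--     return all_combos
-- ===== SOURCE B (Python) =====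
-- def generate_key_combinations(grouped_keys):
--     """
--     Generate all combinations picking one keyword per aspect group.
--     Also includes combinations where some aspects are omitted.
--     Each combo is a list of pieces.
--     """
--     groups = list(grouped_keys.values())
--
--     def rec(gs):
--         if not gs:
--             return [[]]
--         rest = rec(gs[1:])
--         out = []
--         for kw in gs[0]:
--             for tail in rest:
--                 out.append([kw] + tail)
--         out.extend(rest)  # the "skip this group" branch, last (like None)
--         return out
--
--     # the single all-skipped (empty) selection is the last element: drop it
--     return rec(groups)[:-1]
-- ===== Notes on version B (the rewrite author's own statement) =====
-- stated objective: alternative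
-- what changed: Replaces itertools.product over None-padded groups plus a post-filter with a direct recursion over the groups that builds each selection (element branches then a skip branch) and drops the single empty selection at the end.
import Mathlib
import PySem

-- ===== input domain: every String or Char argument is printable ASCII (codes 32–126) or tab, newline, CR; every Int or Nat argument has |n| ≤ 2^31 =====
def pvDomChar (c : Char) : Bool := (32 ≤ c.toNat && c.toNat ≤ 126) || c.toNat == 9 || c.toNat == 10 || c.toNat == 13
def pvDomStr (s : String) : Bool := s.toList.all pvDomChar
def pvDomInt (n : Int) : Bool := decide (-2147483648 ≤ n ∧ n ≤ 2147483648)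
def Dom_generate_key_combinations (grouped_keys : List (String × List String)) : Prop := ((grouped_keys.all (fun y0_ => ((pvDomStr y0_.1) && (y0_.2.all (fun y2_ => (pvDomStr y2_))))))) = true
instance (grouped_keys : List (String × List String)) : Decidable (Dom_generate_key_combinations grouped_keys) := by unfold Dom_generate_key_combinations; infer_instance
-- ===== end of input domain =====

-- B replaces itertools.product over None-padded groups + post-filter by a direct recursion over
-- the groups (pick each keyword in order, then a skip branch) that drops the one empty selection
-- at the end; same ordering, same cost (objective: alternative decomposition).


-- ===== PORT A =====
-- itertools.product(*lists): leftmost iterable varies slowest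
def pvProduct : List (List (Option String)) → List (List (Option String))
  | [] => [[]]
  | g :: gs => g.flatMap (fun c => (pvProduct gs).map (c :: ·))

def generate_key_combinations (grouped_keys : List (String × List String)) : List (List String) :=
  let groups := (PySem.Dict.ofList grouped_keys).values
  let choices_per_group := groups.map (fun group => group.map some ++ [none])
  (pvProduct choices_per_group).foldl
    (fun all_combos combo =>
      let selected := combo.filterMap id          -- [c for c in combo if c is not None]
      if selected ≠ [] then all_combos ++ [selected] else all_combos)
    []

-- ===== PORT B =====
def pvRec : List (List String) → List (List String)
  | [] => [[]]
  | g :: gs =>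
    let rest := pvRec gs
    (g.flatMap (fun kw => rest.map (kw :: ·))) ++ rest

def generate_key_combinations_alt (grouped_keys : List (String × List String)) : List (List String) :=
  (pvRec (PySem.Dict.ofList grouped_keys).values).dropLast

-- ===== PRECONDITION & SPEC =====
def Spec_generate_key_combinations (grouped_keys : List (String × List String)) (out : List (List String)) : Prop := out = generate_key_combinations_alt grouped_keys
instance (grouped_keys : List (String × List String)) (out : List (List String)) : Decidable (Spec_generate_key_combinations grouped_keys out) := by unfold Spec_generate_key_combinations; infer_instance

-- ===== CLAIM (what is proved, stated in full; the proofs are below) =====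
def Claim_equal_generate_key_combinations : Prop := ∀ (grouped_keys : List (String × List String)), Dom_generate_key_combinations grouped_keys → Spec_generate_key_combinations grouped_keys (generate_key_combinations grouped_keys)

-- ===== LEMMAS AND PROOFS =====

-- Filtering the None entries out of each product tuple yields exactly B's recursion.
theorem map_filterMap_pvProduct (gs : List (List String)) :
    (pvProduct (gs.map (fun g => g.map some ++ [none]))).map (·.filterMap id) = pvRec gs := by
  induction gs with
  | nil => rfl
  | cons g gs ih =>
    simp only [List.map_cons, pvProduct, pvRec, List.flatMap_append, List.map_append,
      List.flatMap_map, List.map_flatMap]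
    rw [← ih]
    simp [Function.comp_def, List.filterMap_cons]

-- pvRec gs is a list of nonempty selections followed by the single empty selection.
theorem pvRec_shape (gs : List (List String)) :
    ∃ E : List (List String), pvRec gs = E ++ [[]] ∧ ∀ l ∈ E, l ≠ [] := by
  induction gs with
  | nil => exact ⟨[], rfl, by simp⟩
  | cons g gs ih =>
    obtain ⟨E, hE, hne⟩ := ih
    refine ⟨g.flatMap (fun kw => (pvRec gs).map (kw :: ·)) ++ E, ?_, ?_⟩
    · simp [pvRec, hE]
    · intro l hl
      rcases List.mem_append.1 hl with h | h
      · obtain ⟨kw, hkw, hmem⟩ := List.mem_flatMap.1 h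
        obtain ⟨t, ht, rfl⟩ := List.mem_map.1 hmem
        simp
      · exact hne l h

theorem filter_pvRec_eq_dropLast (gs : List (List String)) :
    (pvRec gs).filter (fun s => decide (s ≠ [])) = (pvRec gs).dropLast := by
  obtain ⟨E, hE, hne⟩ := pvRec_shape gs
  have h1 : E.filter (fun s => decide (s ≠ [])) = E :=
    List.filter_eq_self.2 (by simpa using hne)
  rw [hE, List.dropLast_concat, List.filter_append, h1]
  simp

-- A's loop appends each nonempty selection: it is filter-of-map of the product list.
theorem foldl_select (l : List (List (Option String))) (acc : List (List String)) :
    l.foldl (fun all_combos combo =>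
        if List.filterMap id combo ≠ [] then all_combos ++ [List.filterMap id combo] else all_combos)
      acc
      = acc ++ (l.map (List.filterMap id)).filter (fun s => decide (s ≠ [])) := by
  induction l generalizing acc with
  | nil => simp
  | cons x xs ih =>
    simp only [List.foldl_cons, List.map_cons, List.filter_cons]
    by_cases h : List.filterMap id x = []
    · rw [if_neg (fun hc => hc h),
        if_neg (by simpa using List.filterMap_eq_nil_iff.mp h), ih]
    · rw [if_pos h,
        if_pos (by simpa [List.filterMap_eq_nil_iff, not_forall] using h), ih]
      simp

-- ===== VERDICT (by name: the statement is the Claim_ definition above) =====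
theorem generate_key_combinations_spec : Claim_equal_generate_key_combinations := by
  intro grouped_keys _
  simp only [Spec_generate_key_combinations, generate_key_combinations,
    generate_key_combinations_alt]
  rw [foldl_select, map_filterMap_pvProduct, filter_pvRec_eq_dropLast, List.nil_append]
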